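-- pv_equiv track=rewrite | github.com/tisabe/jraph_MPEU | jraph_MPEU/input_pipeline.py | split_dict_to_lists
-- ===== SOURCE A (Python) =====
-- def split_dict_to_lists(split_dict_in):
--     """Convert split_dict to signature {'split1': [...], 'split2': [...], ...}.
--
--     split_dict must have signature
--     {1: 'split1', 2: 'split1',... 11: 'split2',...}.
--     """
--     split_lists = {}
--     for id_single, split in split_dict_in.items():
--         if split in split_lists.keys():
--             split_lists[split].append(id_single)
--         else:
--             split_lists[split] = []
--             split_lists[split].append(id_single)
--     return split_lists
-- ===== SOURCE B (Python) =====
-- def split_dict_to_lists(split_dict_in):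
--     """Convert split_dict to signature {'split1': [...], 'split2': [...], ...}."""
--     keys = dict.fromkeys(split_dict_in.values())
--     return {s: [i for i, sp in split_dict_in.items() if sp == s] for s in keys}
-- ===== Notes on version B (the rewrite author's own statement) =====
-- stated objective: alternative
-- what changed: Replaces A's single grouping fold over a mutable dict with a two-pass form: first collect the distinct split values in first-appearance order, then build each group by filtering the items per value.
import Mathlib
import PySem

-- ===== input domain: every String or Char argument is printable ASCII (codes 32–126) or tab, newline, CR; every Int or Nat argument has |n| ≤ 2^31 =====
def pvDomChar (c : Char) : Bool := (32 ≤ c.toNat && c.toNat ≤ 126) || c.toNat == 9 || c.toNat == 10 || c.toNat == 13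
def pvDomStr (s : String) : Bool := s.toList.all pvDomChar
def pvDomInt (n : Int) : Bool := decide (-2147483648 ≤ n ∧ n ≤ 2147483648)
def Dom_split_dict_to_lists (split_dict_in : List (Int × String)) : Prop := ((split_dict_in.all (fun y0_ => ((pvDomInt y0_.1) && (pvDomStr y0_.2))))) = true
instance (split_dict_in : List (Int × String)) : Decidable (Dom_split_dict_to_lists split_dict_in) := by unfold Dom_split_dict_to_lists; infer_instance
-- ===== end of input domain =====

-- ===== PORT A =====
-- A: one pass over items, appending each id to the (possibly freshly created) list for its split.
def split_dict_to_lists (split_dict_in : List (Int × String)) : List (String × List Int) :=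
  (split_dict_in.foldl
    (fun (split_lists : PySem.Dict String (List Int)) p =>
      if split_lists.contains p.2 then
        split_lists.modify p.2 [] (· ++ [p.1])
      else
        (split_lists.insert p.2 []).modify p.2 [] (· ++ [p.1]))
    PySem.Dict.empty).items

-- ===== PORT B =====
-- B: distinct split values in first-appearance order, then one filtering pass per value.
def split_dict_to_lists_alt (split_dict_in : List (Int × String)) : List (String × List Int) :=
  (PySem.Set.ofList (split_dict_in.map (·.2))).map
    (fun s => (s, (split_dict_in.filter (fun p => p.2 == s)).map (·.1)))

-- ===== PRECONDITION & SPEC =====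
def Spec_split_dict_to_lists (split_dict_in : List (Int × String)) (out : List (String × List Int)) : Prop := out = split_dict_to_lists_alt split_dict_in
instance (split_dict_in : List (Int × String)) (out : List (String × List Int)) : Decidable (Spec_split_dict_to_lists split_dict_in out) := by unfold Spec_split_dict_to_lists; infer_instance

-- ===== CLAIM (what is proved, stated in full; the proofs are below) =====
def Claim_equal_split_dict_to_lists : Prop := ∀ (split_dict_in : List (Int × String)), Dom_split_dict_to_lists split_dict_in → Spec_split_dict_to_lists split_dict_in (split_dict_to_lists split_dict_in)

-- ===== LEMMAS AND PROOFS =====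
-- The two branches of A's loop body are the same dict update: append p.1 to the entry at p.2.
theorem pvStepEq (d : PySem.Dict String (List Int)) (p : Int × String) :
    (if d.contains p.2 then d.modify p.2 [] (· ++ [p.1])
     else (d.insert p.2 []).modify p.2 [] (· ++ [p.1]))
      = d.modify p.2 [] (· ++ [p.1]) := by
  by_cases h : d.contains p.2
  · simp [h]
  · simp [PySem.Dict.modify, PySem.Dict.getD_insert_self, h,
      PySem.Dict.getD_of_not_contains, PySem.Dict.insert_insert_self]

theorem pvFoldItems (l : List (Int × String)) :
    (l.foldl (fun (d : PySem.Dict String (List Int)) p => d.modify p.2 [] (· ++ [p.1]))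
        PySem.Dict.empty).items
      = (PySem.Set.ofList (l.map (·.2))).map
          (fun s => (s, (l.filter (fun p => p.2 == s)).map (·.1))) := by
  have hswap :
      l.foldl (fun (d : PySem.Dict String (List Int)) p => d.modify p.2 [] (· ++ [p.1]))
          PySem.Dict.empty
        = (l.map (fun p => (p.2, p.1))).foldl
            (fun (d : PySem.Dict String (List Int)) p => d.modify p.1 [] (· ++ [p.2]))
            PySem.Dict.empty := by
    rw [List.foldl_map]
  rw [hswap]
  set m := l.map (fun p => (p.2, p.1)) with hm
  have hnd : ((m.foldl
      (fun (d : PySem.Dict String (List Int)) p => d.modify p.1 [] (· ++ [p.2]))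
      PySem.Dict.empty)).keys.Nodup := by
    exact PySem.Dict.nodup_keys_foldl_modify_key m Prod.fst [] _ PySem.Dict.empty
      (by simp)
  rw [PySem.Dict.items_eq_map_keys _ hnd []]
  have hkeys : ((m.foldl
      (fun (d : PySem.Dict String (List Int)) p => d.modify p.1 [] (· ++ [p.2]))
      PySem.Dict.empty)).keys = PySem.Set.ofList (l.map (·.2)) := by
    rw [PySem.Dict.keys_foldl_modify_key]
    simp [hm, PySem.Set.update_nil_left, Function.comp_def, List.map_map]
  rw [hkeys]
  apply List.map_congr_left
  intro s _
  rw [PySem.Dict.getD_foldl_modify_append]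
  simp [hm, List.filter_map, Function.comp_def, List.map_map]

-- ===== VERDICT (by name: the statement is the Claim_ definition above) =====
theorem split_dict_to_lists_spec : Claim_equal_split_dict_to_lists := by
  intro l _
  unfold Spec_split_dict_to_lists split_dict_to_lists split_dict_to_lists_alt
  rw [show (fun (d : PySem.Dict String (List Int)) (p : Int × String) =>
      if d.contains p.2 then d.modify p.2 [] (· ++ [p.1])
      else (d.insert p.2 []).modify p.2 [] (· ++ [p.1]))
    = fun d p => d.modify p.2 [] (· ++ [p.1]) from funext fun d => funext fun p => pvStepEq d p]
  exact pvFoldItems l
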